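-- pv_equiv track=rewrite | github.com/gobii-ai/gobii-platform | api/evals/scenarios/job_listings_bundled_reply.py | _is_job_message
-- ===== SOURCE A (Python) =====
-- def _is_job_message(body: str) -> bool:
--     text = (body or "").lower()
--     if not text.strip():
--         return False
--     url_count = text.count("http")
--     keyword_hits = sum(
--         1
--         for kw in ("full stack", "software engineer", "job", "opening", "role", "position", "apply")
--         if kw in text
--     )
--     bullet_like = sum(
--         1
--         for line in (body or "").splitlines()
--         if line.strip().startswith(("-", "*", "•"))
--         or line.strip().split(" ", 1)[0].rstrip(".").isdigit()
--     )
--     return url_count >= 2 or bullet_like >= 3 or (keyword_hits >= 3 and len(text) > 80)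
-- ===== SOURCE B (Python) =====
-- _KEYWORDS = ("full stack", "software engineer", "job", "opening", "role", "position", "apply")
--
--
-- def _is_job_message(body: str) -> bool:
--     text = (body or "").lower()
--     if not text.strip():
--         return False
--     url_count = 0
--     bullet_like = 0
--     found = set()
--     for line in (body or "").splitlines():
--         low = line.lower()
--         url_count += low.count("http")
--         for kw in _KEYWORDS:
--             if kw in low:
--                 found.add(kw)
--         head = line.strip().split(" ", 1)[0]
--         if line.strip().startswith(("-", "*", "•")) or head.rstrip(".").isdigit():
--             bullet_like += 1
--     return url_count >= 2 or bullet_like >= 3 or (len(found) >= 3 and len(text) > 80)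
-- ===== Notes on version B (the rewrite author's own statement) =====
-- stated objective: alternative
-- what changed: A's three independent scans (text.count over the whole text, a sum over the keyword tuple against the whole text, and a sum over splitlines) are replaced by a single pass over (body or '').splitlines() that accumulates the url count, the bullet count and a set of keywords found so far in one loop.
import Mathlib
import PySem

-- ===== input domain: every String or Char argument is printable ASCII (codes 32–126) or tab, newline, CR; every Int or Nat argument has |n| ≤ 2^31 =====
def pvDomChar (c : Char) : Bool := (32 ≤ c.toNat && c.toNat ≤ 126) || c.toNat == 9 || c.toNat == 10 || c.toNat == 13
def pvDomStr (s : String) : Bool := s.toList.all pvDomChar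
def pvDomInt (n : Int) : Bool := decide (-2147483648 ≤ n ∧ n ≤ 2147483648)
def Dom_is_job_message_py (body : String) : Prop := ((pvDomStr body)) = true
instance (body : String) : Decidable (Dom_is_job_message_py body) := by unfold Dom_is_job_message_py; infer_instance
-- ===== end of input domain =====

-- B re-implements A as one pass over the lines (one accumulator loop instead of three
-- independent scans over two structures); objective: alternative decomposition, same cost.

-- ===== shared helpers (both Python versions contain these literal constants/expressions) =====

-- "http"
def pvHttp : List Char := ['h', 't', 't', 'p']

-- the keyword tuple, shared verbatim by both Pythons
def pvKws : List String :=
  ["full stack", "software engineer", "job", "opening", "role", "position", "apply"]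

-- line.strip().startswith(("-", "*", "•")) or line.strip().split(" ", 1)[0].rstrip(".").isdigit()
-- (identical expression in A and B; rstrip(".") is ported by hand as reverse/dropWhile/reverse,
-- exact because rstrip with an explicit char set drops exactly the trailing '.' characters;
-- split(" ", 1) always returns a non-empty list, so [0] is headD)
def pvBullet (line : List Char) : Bool :=
  let s := PySem.Chars.strip line
  PySem.Chars.startswith s ['-'] || PySem.Chars.startswith s ['*'] ||
    PySem.Chars.startswith s ['•'] ||
    PySem.Chars.strIsdigit
      ((((PySem.Chars.splitOnMax s [' '] 1).headD []).reverse.dropWhile (· == '.')).reverse)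

-- ===== PORT A =====
-- three separate scans: text.count, a sum over the keyword tuple, a sum over splitlines
-- ((body or "") = body for every str, ported as body)
def is_job_message_py (body : String) : Bool :=
  let text := PySem.Chars.lower body.toList
  if (PySem.Chars.strip text).isEmpty then false
  else
    let url_count : Int := (PySem.Chars.count text pvHttp : Int)
    let keyword_hits : Int :=
      (pvKws.map (fun kw => if PySem.Chars.isIn kw.toList text then (1 : Int) else 0)).sum
    let bullet_like : Int :=
      ((PySem.Chars.splitlines body.toList).map
        (fun line => if pvBullet line then (1 : Int) else 0)).sum
    decide (url_count ≥ 2) || decide (bullet_like ≥ 3) ||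
      (decide (keyword_hits ≥ 3) && decide (text.length > 80))

-- ===== PORT B =====
-- one loop over splitlines(body) with a triple accumulator (url count, bullet count, found-keyword set)
def is_job_message_py_alt (body : String) : Bool :=
  let text := PySem.Chars.lower body.toList
  if (PySem.Chars.strip text).isEmpty then false
  else
    let st :=
      (PySem.Chars.splitlines body.toList).foldl
        (fun (st : Int × Int × PySem.Set String) line =>
          let low := PySem.Chars.lower line
          let url : Int := st.1 + (PySem.Chars.count low pvHttp : Int)
          let found :=
            pvKws.foldl
              (fun f kw => if PySem.Chars.isIn kw.toList low then PySem.Set.add f kw else f)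
              st.2.2
          let bl : Int := if pvBullet line then st.2.1 + 1 else st.2.1
          (url, bl, found))
        (0, 0, PySem.Set.empty)
    decide (st.1 ≥ 2) || decide (st.2.1 ≥ 3) ||
      (decide ((st.2.2.length : Int) ≥ 3) && decide (text.length > 80))

-- ===== PRECONDITION & SPEC =====
def Spec_is_job_message_py (body : String) (out : Bool) : Prop := out = is_job_message_py_alt body
instance (body : String) (out : Bool) : Decidable (Spec_is_job_message_py body out) := by unfold Spec_is_job_message_py; infer_instance

-- ===== CLAIM (what is proved, stated in full; the proofs are below) =====
def Claim_equal_is_job_message_py : Prop := ∀ (body : String), Dom_is_job_message_py body → Spec_is_job_message_py body (is_job_message_py body)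

-- ===== LEMMAS AND PROOFS =====

-- a char that is not a line break ('\n' or '\r')
def pvNB (c : Char) : Bool := !(c == '\n' || c == '\r')

-- Python's greedy non-overlapping substring count, structurally
def gcount (p : List Char) : List Char → Nat
  | [] => 0
  | c :: t =>
    if p.isPrefixOf (c :: t) then gcount p (List.drop (p.length - 1) t) + 1 else gcount p t
  termination_by s => s.length
  decreasing_by all_goals (simp [List.length_drop]; try omega)

theorem count_go_eq (p : List Char) (hp : p ≠ []) :
    ∀ fuel s acc, s.length ≤ fuel → PySem.Chars.count.go p fuel s acc = acc + gcount p s := by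
  intro fuel
  induction fuel with
  | zero =>
    intro s acc h
    have : s = [] := by cases s <;> simp_all
    subst this
    simp [PySem.Chars.count.go, gcount]
  | succ n ih =>
    intro s acc h
    cases s with
    | nil => simp [PySem.Chars.count.go, gcount]
    | cons c t =>
      rw [PySem.Chars.count.go.eq_def]
      simp only []
      obtain ⟨q, p', rfl⟩ : ∃ q p', p = q :: p' := by cases p <;> simp_all
      by_cases hpre : (q :: p').isPrefixOf (c :: t) = true
      · have hlen : (q :: p').length ≤ (c :: t).length :=
          List.IsPrefix.length_le (List.isPrefixOf_iff_prefix.mp hpre)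
        rw [if_pos hpre]
        have hd : List.drop (q :: p').length (c :: t) = List.drop ((q :: p').length - 1) t := by
          simp [List.length_cons]
        rw [ih _ _ (by simp at hlen h ⊢; omega), hd]
        rw [gcount, if_pos hpre]
        omega
      · rw [if_neg hpre, ih _ _ (by simp at h ⊢; omega), gcount, if_neg hpre]

theorem count_eq_gcount (p s : List Char) (hp : p ≠ []) :
    PySem.Chars.count s p = gcount p s := by
  rw [PySem.Chars.count]
  rw [if_neg (by simpa using hp)]
  simpa using count_go_eq p hp s.length s 0 le_rfl

theorem prefix_confined (p u v : List Char) (hp : ∀ c ∈ p, pvNB c = true)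
    (hv : v = [] ∨ ∃ c t, v = c :: t ∧ pvNB c = false)
    (h : p <+: u ++ v) : p <+: u ∧ p.length ≤ u.length := by
  by_cases hlen : p.length ≤ u.length
  · refine ⟨?_, hlen⟩
    exact List.prefix_of_prefix_length_le h (List.prefix_append u v) hlen
  · exfalso
    push Not at hlen
    have hup : u <+: p := List.prefix_of_prefix_length_le (List.prefix_append u v) h (le_of_lt hlen)
    have hplen : p.length ≤ u.length + v.length := by simpa using h.length_le
    rcases hv with rfl | ⟨c, t, rfl, hc⟩
    · simp at hplen; omega
    · have hi : u.length < p.length := hlen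
      have h1 : p[u.length] = (u ++ c :: t)[u.length]'(by simp) := h.getElem hi
      have hg : (u ++ c :: t)[u.length]'(by simp) = c := by
        simp [List.getElem_append_right (le_refl u.length)]
      have h2 : p[u.length] = c := by rw [h1, hg]
      have h3 := hp _ (List.getElem_mem hi)
      rw [h2, hc] at h3
      exact absurd h3 (by simp)

theorem not_prefix_break (p : List Char) (b : Char) (rest : List Char) (hp0 : p ≠ [])
    (hp : ∀ c ∈ p, pvNB c = true) (hb : pvNB b = false) : ¬ p <+: b :: rest := by
  obtain ⟨q, p', rfl⟩ : ∃ q p', p = q :: p' := by cases p <;> simp_all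
  intro hpre
  have hq : q = b := by
    have := hpre.getElem (i := 0) (by simp)
    simpa using this
  have := hp q (by simp)
  rw [hq, hb] at this
  simp at this

theorem gcount_break_cons (p : List Char) (b : Char) (rest : List Char) (hp0 : p ≠ [])
    (hp : ∀ c ∈ p, pvNB c = true) (hb : pvNB b = false) :
    gcount p (b :: rest) = gcount p rest := by
  rw [gcount]
  rw [if_neg (by
    intro hc
    exact not_prefix_break p b rest hp0 hp hb (List.isPrefixOf_iff_prefix.mp hc))]

theorem gcount_append (p : List Char) (hp0 : p ≠ []) (hp : ∀ c ∈ p, pvNB c = true) :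
    ∀ n u v, u.length ≤ n → (∀ c ∈ u, pvNB c = true) →
    (v = [] ∨ ∃ c t, v = c :: t ∧ pvNB c = false) →
    gcount p (u ++ v) = gcount p u + gcount p v := by
  intro n
  induction n with
  | zero =>
    intro u v hn hu hv
    have : u = [] := by cases u <;> simp_all
    subst this; simp [gcount]
  | succ n ih =>
    intro u v hn hu hv
    cases u with
    | nil => simp [gcount]
    | cons c t =>
      by_cases hpre : p.isPrefixOf (c :: t ++ v) = true
      · have hconf := prefix_confined p (c :: t) v hp hv (List.isPrefixOf_iff_prefix.mp hpre)
        have hpre' : p.isPrefixOf (c :: t) = true := List.isPrefixOf_iff_prefix.mpr hconf.1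
        have hplen : p.length ≤ t.length + 1 := by simpa using hconf.2
        have hplen1 : 1 ≤ p.length := by cases p <;> simp_all
        rw [show ((c :: t) ++ v) = c :: (t ++ v) by simp, gcount, if_pos (show p.isPrefixOf (c :: (t ++ v)) = true by simpa using hpre)]
        rw [gcount, if_pos hpre']
        have hdrop : List.drop (p.length - 1) (t ++ v) = List.drop (p.length - 1) t ++ v := by
          rw [List.drop_append_of_le_length (by omega)]
        rw [hdrop]
        rw [ih (List.drop (p.length - 1) t) v (by simp at hn ⊢; omega)
          (fun c hc => hu c (List.mem_cons_of_mem _ (List.mem_of_mem_drop hc))) hv]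
        omega
      · have hpre' : p.isPrefixOf (c :: t) ≠ true := by
          intro hc
          exact hpre (List.isPrefixOf_iff_prefix.mpr
            ((List.isPrefixOf_iff_prefix.mp hc).trans (by exact List.prefix_append _ _)))
        rw [show ((c :: t) ++ v) = c :: (t ++ v) by simp, gcount, if_neg (show ¬ p.isPrefixOf (c :: (t ++ v)) = true by simpa using hpre)]
        rw [gcount, if_neg hpre']
        exact ih t v (by simp at hn; omega) (fun c hc => hu c (List.mem_cons_of_mem _ hc)) hv

theorem infix_break_cons (p : List Char) (b : Char) (rest : List Char) (hp0 : p ≠ [])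
    (hp : ∀ c ∈ p, pvNB c = true) (hb : pvNB b = false) :
    (p <:+: b :: rest) ↔ p <:+: rest := by
  rw [List.infix_cons_iff]
  constructor
  · rintro (h | h)
    · exact absurd h (not_prefix_break p b rest hp0 hp hb)
    · exact h
  · exact Or.inr

theorem infix_append_iff (p : List Char) (hp0 : p ≠ []) (hp : ∀ c ∈ p, pvNB c = true) :
    ∀ u v, (∀ c ∈ u, pvNB c = true) → (v = [] ∨ ∃ c t, v = c :: t ∧ pvNB c = false) →
    ((p <:+: u ++ v) ↔ p <:+: u ∨ p <:+: v) := by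
  intro u
  induction u with
  | nil =>
    intro v hu hv
    simp [List.infix_nil, hp0]
  | cons c t ih =>
    intro v hu hv
    rw [show ((c :: t) ++ v) = c :: (t ++ v) by simp, List.infix_cons_iff, List.infix_cons_iff,
      ih v (fun x hx => hu x (List.mem_cons_of_mem _ hx)) hv]
    constructor
    · rintro (h | h | h)
      · left; left
        have hconf := prefix_confined p (c :: t) v hp hv h
        exact hconf.1
      · left; right; exact h
      · right; exact h
    · rintro (⟨h | h⟩ | h)
      · left; exact h.trans (by exact List.prefix_append _ _)
      · right; left; exact h
      · right; right; exact h

-- pure structural model of str.splitlines for strings whose only break chars are \n, \r, \r\n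
def plines : List Char → List (List Char)
  | [] => []
  | c :: rest =>
    if c == '\n' then [] :: plines rest
    else if c == '\r' then
      match rest with
      | '\n' :: rest' => [] :: plines rest'
      | [] => [[]]
      | d :: rest' => [] :: plines (d :: rest')
    else
      match plines rest with
      | [] => [[c]]
      | l :: ls => (c :: l) :: ls
  termination_by s => s.length
  decreasing_by all_goals (simp; try omega)

theorem plines_nil : plines [] = [] := by rw [plines.eq_def]

theorem plines_cons_n (rest : List Char) : plines ('\n' :: rest) = [] :: plines rest := by
  rw [plines.eq_def]; simp

theorem plines_rn (rest : List Char) : plines ('\r' :: '\n' :: rest) = [] :: plines rest := by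
  rw [plines.eq_def]; simp

theorem plines_r (rest : List Char) (h : ∀ t, rest ≠ '\n' :: t) :
    plines ('\r' :: rest) = [] :: plines rest := by
  rw [plines.eq_def]
  simp only [show ('\r' == '\n') = false by decide, show ('\r' == '\r') = true by decide,
    Bool.false_eq_true, if_false, if_true]
  match rest, h with
  | [], _ => rw [plines_nil]
  | '\n' :: t, h => exact absurd rfl (h t)
  | d :: t, h =>
    by_cases hd : d = '\n'
    · subst hd; exact absurd rfl (h t)
    · simp

theorem plines_nb (c : Char) (rest : List Char) (h1 : c ≠ '\n') (h2 : c ≠ '\r') :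
    plines (c :: rest) =
      match plines rest with
      | [] => [[c]]
      | l :: ls => (c :: l) :: ls := by
  rw [plines.eq_def]
  simp [h1, h2]

theorem plines_ne_nil (s : List Char) (h : s ≠ []) : plines s ≠ [] := by
  match s with
  | [] => exact absurd rfl h
  | c :: rest =>
    by_cases h1 : c = '\n'
    · subst h1; rw [plines_cons_n]; simp
    · by_cases h2 : c = '\r'
      · subst h2
        match rest with
        | '\n' :: t => rw [plines_rn]; simp
        | [] => rw [plines_r [] (by simp)]; simp
        | d :: t =>
          by_cases hd : d = '\n'
          · subst hd; rw [plines_rn]; simp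
          · rw [plines_r (d :: t) (by intro u hu; injection hu with h _; exact hd h)]; simp
      · rw [plines_nb c rest h1 h2]
        cases plines rest <;> simp

theorem plines_shape (s : List Char) :
    ((∀ c ∈ s, pvNB c = true) ∧ plines s = if s = [] then [] else [s]) ∨
    (∃ line br rest, s = line ++ br ++ rest ∧ (∀ c ∈ line, pvNB c = true) ∧
      (br = ['\n'] ∨ br = ['\r'] ∨ br = ['\r', '\n']) ∧ plines s = line :: plines rest) := by
  induction s using plines.induct with
  | case1 => left; simp [plines_nil]
  | case2 c rest hc ih =>
    have hc' : c = '\n' := by simpa using hc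
    subst hc'
    right
    exact ⟨[], ['\n'], rest, by simp, by simp, Or.inl rfl, by rw [plines_cons_n]⟩
  | case3 c hn hr rest' ih =>
    have hc' : c = '\r' := by simpa using hr
    subst hc'
    right
    exact ⟨[], ['\r', '\n'], rest', by simp, by simp, Or.inr (Or.inr rfl), by rw [plines_rn]⟩
  | case4 c hn hr =>
    have hc' : c = '\r' := by simpa using hr
    subst hc'
    right
    exact ⟨[], ['\r'], [], by simp, by simp, Or.inr (Or.inl rfl),
      by rw [plines_r [] (by simp)]⟩
  | case5 c hn hr d rest' hd ih =>
    have hc' : c = '\r' := by simpa using hr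
    subst hc'
    right
    refine ⟨[], ['\r'], d :: rest', by simp, by simp, Or.inr (Or.inl rfl), ?_⟩
    rw [plines_r (d :: rest') (by intro u hu; injection hu with h _; exact hd h)]
  | case6 c rest hn hr hpl ih =>
    have hn' : c ≠ '\n' := by simpa using hn
    have hr' : c ≠ '\r' := by simpa using hr
    have hrest : rest = [] := by
      by_contra h
      exact plines_ne_nil rest h hpl
    subst hrest
    left
    constructor
    · intro x hx
      simp at hx
      subst hx
      simp [pvNB, hn', hr']
    · rw [plines_nb c [] hn' hr', plines_nil]
      simp
  | case7 c rest hn hr l ls hpl ih =>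
    have hn' : c ≠ '\n' := by simpa using hn
    have hr' : c ≠ '\r' := by simpa using hr
    have hcnb : pvNB c = true := by simp [pvNB, hn', hr']
    rcases ih with ⟨hfree, heq⟩ | ⟨line, br, rest', heq, hfree, hbr, hpl'⟩
    · -- rest break-free
      left
      have hrne : rest ≠ [] := by
        intro h; subst h; rw [plines_nil] at hpl; simp at hpl
      rw [if_neg hrne] at heq
      constructor
      · intro x hx
        rcases List.mem_cons.mp hx with rfl | hx
        · exact hcnb
        · exact hfree x hx
      · rw [plines_nb c rest hn' hr', heq]
        simp
    · -- rest = line ++ br ++ rest'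
      right
      refine ⟨c :: line, br, rest', by simp [heq], ?_, hbr, ?_⟩
      · intro x hx
        rcases List.mem_cons.mp hx with rfl | hx
        · exact hcnb
        · exact hfree x hx
      · rw [plines_nb c rest hn' hr', hpl']

theorem br_head (br : List Char) (hbr : br = ['\n'] ∨ br = ['\r'] ∨ br = ['\r', '\n']) :
    ∃ c t, br ++ rest = c :: t ∧ pvNB c = false := by
  rcases hbr with rfl | rfl | rfl <;> exact ⟨_, _, rfl, by decide⟩

theorem gcount_breaks (p : List Char) (hp0 : p ≠ []) (hp : ∀ c ∈ p, pvNB c = true)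
    (br rest : List Char) (hbr : br = ['\n'] ∨ br = ['\r'] ∨ br = ['\r', '\n']) :
    gcount p (br ++ rest) = gcount p rest := by
  rcases hbr with rfl | rfl | rfl
  · exact gcount_break_cons p _ _ hp0 hp (by decide)
  · exact gcount_break_cons p _ _ hp0 hp (by decide)
  · rw [show (['\r', '\n'] ++ rest) = '\r' :: '\n' :: rest by rfl,
      gcount_break_cons p _ _ hp0 hp (by decide), gcount_break_cons p _ _ hp0 hp (by decide)]

theorem infix_breaks (p : List Char) (hp0 : p ≠ []) (hp : ∀ c ∈ p, pvNB c = true)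
    (br rest : List Char) (hbr : br = ['\n'] ∨ br = ['\r'] ∨ br = ['\r', '\n']) :
    (p <:+: br ++ rest) ↔ p <:+: rest := by
  rcases hbr with rfl | rfl | rfl
  · exact infix_break_cons p _ _ hp0 hp (by decide)
  · exact infix_break_cons p _ _ hp0 hp (by decide)
  · rw [show (['\r', '\n'] ++ rest) = '\r' :: '\n' :: rest by rfl,
      infix_break_cons p _ _ hp0 hp (by decide), infix_break_cons p _ _ hp0 hp (by decide)]

theorem gcount_plines (p : List Char) (hp0 : p ≠ []) (hp : ∀ c ∈ p, pvNB c = true) :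
    ∀ n s, s.length ≤ n → gcount p s = ((plines s).map (gcount p)).sum := by
  intro n
  induction n with
  | zero =>
    intro s hn
    have : s = [] := by cases s <;> simp_all
    subst this
    simp [plines_nil, gcount]
  | succ n ih =>
    intro s hn
    rcases plines_shape s with ⟨hfree, heq⟩ | ⟨line, br, rest, rfl, hfree, hbr, heq⟩
    · rw [heq]
      by_cases hs : s = []
      · subst hs; simp [gcount]
      · simp [hs]
    · rw [heq]
      have hbrlen : 1 ≤ br.length := by rcases hbr with rfl | rfl | rfl <;> simp
      rw [List.append_assoc, gcount_append p hp0 hp line.length line (br ++ rest) le_rfl hfree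
        (Or.inr (br_head br hbr))]
      rw [gcount_breaks p hp0 hp br rest hbr]
      rw [ih rest (by simp at hn; omega)]
      simp

theorem infix_plines (p : List Char) (hp0 : p ≠ []) (hp : ∀ c ∈ p, pvNB c = true) :
    ∀ n s, s.length ≤ n → ((p <:+: s) ↔ ∃ l ∈ plines s, p <:+: l) := by
  intro n
  induction n with
  | zero =>
    intro s hn
    have : s = [] := by cases s <;> simp_all
    subst this
    simp [plines_nil, List.infix_nil, hp0]
  | succ n ih =>
    intro s hn
    rcases plines_shape s with ⟨hfree, heq⟩ | ⟨line, br, rest, rfl, hfree, hbr, heq⟩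
    · rw [heq]
      by_cases hs : s = []
      · subst hs; simp [List.infix_nil, hp0]
      · simp [hs]
    · rw [heq]
      have hbrlen : 1 ≤ br.length := by rcases hbr with rfl | rfl | rfl <;> simp
      rw [List.append_assoc, infix_append_iff p hp0 hp line (br ++ rest) hfree
        (Or.inr (br_head br hbr))]
      rw [infix_breaks p hp0 hp br rest hbr]
      rw [ih rest (by simp at hn; omega)]
      simp

theorem lowerChar_break (c : Char) (b : Char) (hb : b = '\n' ∨ b = '\r') :
    (PySem.Chars.lowerChar c = b) ↔ c = b := by
  unfold PySem.Chars.lowerChar PySem.Chars.isupper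
  by_cases h : ('A' ≤ c ∧ c ≤ 'Z')
  · rw [if_pos (by simp [h.1, h.2])]
    have h1 : 65 ≤ c.toNat := by
      have := h.1; rw [Char.le_def] at this; exact UInt32.le_iff_toNat_le.mp this
    have h2 : c.toNat ≤ 90 := by
      have := h.2; rw [Char.le_def] at this; exact UInt32.le_iff_toNat_le.mp this
    have hv : (Char.ofNat (c.toNat + 32)).toNat = c.toNat + 32 := by
      rw [Char.toNat_ofNat, if_pos (Or.inl (by omega))]
    constructor
    · intro he
      exfalso
      have hbx : (Char.ofNat (c.toNat + 32)).toNat = b.toNat := by rw [he]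
      rw [hv] at hbx
      rcases hb with rfl | rfl <;> (simp at hbx; try omega)
    · intro he
      exfalso
      rcases hb with rfl | rfl <;> (rw [he] at h1; simp at h1)
  · rw [if_neg (by
      intro hc
      simp at hc
      exact h ⟨hc.1, hc.2⟩)]

theorem lower_nil : PySem.Chars.lower [] = [] := rfl
theorem lower_cons (c : Char) (t : List Char) :
    PySem.Chars.lower (c :: t) = PySem.Chars.lowerChar c :: PySem.Chars.lower t := rfl
theorem lowerChar_nb (c : Char) (b : Char) (hb : b = '\n' ∨ b = '\r') (h : c ≠ b) :
    PySem.Chars.lowerChar c ≠ b := fun he => h ((lowerChar_break c b hb).mp he)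
theorem lowerChar_fix (b : Char) (hb : b = '\n' ∨ b = '\r') : PySem.Chars.lowerChar b = b := by
  rcases hb with rfl | rfl <;> decide

theorem plines_lower (s : List Char) :
    plines (PySem.Chars.lower s) = (plines s).map PySem.Chars.lower := by
  induction s using plines.induct with
  | case1 => simp [lower_nil, plines_nil]
  | case2 c rest hc ih =>
    have hc' : c = '\n' := by simpa using hc
    subst hc'
    rw [lower_cons, lowerChar_fix '\n' (Or.inl rfl), plines_cons_n, plines_cons_n]
    simp [ih, lower_nil]
  | case3 c hn hr rest' ih =>
    have hc' : c = '\r' := by simpa using hr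
    subst hc'
    rw [lower_cons, lower_cons, lowerChar_fix '\r' (Or.inr rfl),
      lowerChar_fix '\n' (Or.inl rfl), plines_rn, plines_rn]
    simp [ih, lower_nil]
  | case4 c hn hr =>
    have hc' : c = '\r' := by simpa using hr
    subst hc'
    rw [lower_cons, lower_nil, lowerChar_fix '\r' (Or.inr rfl),
      plines_r [] (by simp), plines_nil]
    simp [lower_nil]
  | case5 c hn hr d rest' hd ih =>
    have hc' : c = '\r' := by simpa using hr
    subst hc'
    have hd' : d ≠ '\n' := fun h => hd h
    have hld : PySem.Chars.lowerChar d ≠ '\n' := lowerChar_nb d '\n' (Or.inl rfl) hd'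
    rw [lower_cons, lowerChar_fix '\r' (Or.inr rfl), lower_cons,
      plines_r (PySem.Chars.lowerChar d :: PySem.Chars.lower rest')
        (by intro t ht; injection ht with h _; exact hld h),
      plines_r (d :: rest') (by intro t ht; injection ht with h _; exact hd' h),
      ← lower_cons, ih]
    simp [lower_nil]
  | case6 c rest hn hr hpl ih =>
    have hn' : c ≠ '\n' := by simpa using hn
    have hr' : c ≠ '\r' := by simpa using hr
    rw [lower_cons, plines_nb _ _ (lowerChar_nb c '\n' (Or.inl rfl) hn')
      (lowerChar_nb c '\r' (Or.inr rfl) hr'), plines_nb _ _ hn' hr', ih, hpl]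
    simp [lower_cons, lower_nil]
  | case7 c rest hn hr l ls hpl ih =>
    have hn' : c ≠ '\n' := by simpa using hn
    have hr' : c ≠ '\r' := by simpa using hr
    rw [lower_cons, plines_nb _ _ (lowerChar_nb c '\n' (Or.inl rfl) hn')
      (lowerChar_nb c '\r' (Or.inr rfl) hr'), plines_nb _ _ hn' hr', ih, hpl]
    simp [lower_cons]

-- glue a pending prefix onto the first line
def pvGlue (pre s : List Char) : List (List Char) :=
  match plines s with
  | [] => if pre.isEmpty then [] else [pre]
  | l :: ls => (pre ++ l) :: ls

theorem pvGlue_nil_pre (s : List Char) : pvGlue [] s = plines s := by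
  unfold pvGlue
  match h : plines s with
  | [] => simp
  | l :: ls => simp

-- go reduction lemmas
theorem go_nil (isB : Char → Bool) (cur : List Char) (acc : List (List Char)) :
    PySem.Chars.splitlines.go isB [] cur acc =
      if cur.isEmpty then acc.reverse else (cur.reverse :: acc).reverse := by
  rw [PySem.Chars.splitlines.go.eq_def]

theorem go_rn (isB : Char → Bool) (rest cur : List Char) (acc : List (List Char)) :
    PySem.Chars.splitlines.go isB ('\r' :: '\n' :: rest) cur acc =
      PySem.Chars.splitlines.go isB rest [] (cur.reverse :: acc) := by
  rw [PySem.Chars.splitlines.go.eq_def]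
  rfl

theorem go_break (isB : Char → Bool) (c : Char) (rest cur : List Char) (acc : List (List Char))
    (hB : isB c = true) (hne : ∀ t, c = '\r' → rest ≠ '\n' :: t) :
    PySem.Chars.splitlines.go isB (c :: rest) cur acc =
      PySem.Chars.splitlines.go isB rest [] (cur.reverse :: acc) := by
  rw [PySem.Chars.splitlines.go.eq_def]
  by_cases hc : c = '\r'
  · subst hc
    match rest, hne with
    | [], _ => simp [hB]
    | d :: t, hne =>
      have hd : d ≠ '\n' := by
        intro h; subst h; exact hne t rfl rfl
      simp [hB]
  · simp [hB]

theorem go_keep (isB : Char → Bool) (c : Char) (rest cur : List Char) (acc : List (List Char))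
    (hB : isB c = false) (hc : c ≠ '\r') :
    PySem.Chars.splitlines.go isB (c :: rest) cur acc =
      PySem.Chars.splitlines.go isB rest (c :: cur) acc := by
  rw [PySem.Chars.splitlines.go.eq_def]
  match rest with
  | [] => simp [hB]
  | d :: t =>
    by_cases hd : c = '\r' ∧ d = '\n'
    · exact absurd hd.1 hc
    · simp at hd
      by_cases hcr : c = '\r'
      · exact absurd hcr hc
      · simp [hB, hcr]


theorem glue_break (pre rest s : List Char) (hs : plines s = [] :: plines rest) :
    pvGlue pre s = pre :: plines rest := by
  unfold pvGlue
  rw [hs]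
  rcases h : plines rest with _ | ⟨l, ls⟩ <;> simp

theorem go_glue (isB : Char → Bool)
    (hB : ∀ c, pvDomChar c = true → isB c = (c == '\n' || c == '\r')) :
    ∀ s cur acc, s.all pvDomChar = true →
      PySem.Chars.splitlines.go isB s cur acc = acc.reverse ++ pvGlue cur.reverse s := by
  intro s
  induction s using plines.induct with
  | case1 =>
    intro cur acc _
    rw [go_nil]
    unfold pvGlue
    rw [plines_nil]
    by_cases hc : cur.isEmpty <;> simp_all
  | case2 c rest hc ih =>
    have hc' : c = '\n' := by simpa using hc
    subst hc'
    intro cur acc hdom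
    simp only [List.all_cons, Bool.and_eq_true] at hdom
    rw [go_break isB '\n' rest cur acc (by rw [hB '\n' (by decide)]; decide) (by simp),
      ih [] (cur.reverse :: acc) hdom.2, List.reverse_nil, pvGlue_nil_pre,
      glue_break cur.reverse rest _ (plines_cons_n rest)]
    simp
  | case3 c hn hr rest' ih =>
    have hc' : c = '\r' := by simpa using hr
    subst hc'
    intro cur acc hdom
    simp only [List.all_cons, Bool.and_eq_true] at hdom
    rw [go_rn, ih [] (cur.reverse :: acc) hdom.2.2, List.reverse_nil, pvGlue_nil_pre,
      glue_break cur.reverse rest' _ (plines_rn rest')]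
    simp
  | case4 c hn hr =>
    have hc' : c = '\r' := by simpa using hr
    subst hc'
    intro cur acc hdom
    rw [go_break isB '\r' [] cur acc (by rw [hB '\r' (by decide)]; decide) (by simp),
      go_nil, glue_break cur.reverse [] _ (by rw [plines_r [] (by simp), plines_nil]),
      plines_nil]
    simp
  | case5 c hn hr d rest' hd ih =>
    have hc' : c = '\r' := by simpa using hr
    subst hc'
    have hd' : d ≠ '\n' := fun h => hd h
    intro cur acc hdom
    simp only [List.all_cons, Bool.and_eq_true] at hdom
    rw [go_break isB '\r' (d :: rest') cur acc (by rw [hB '\r' (by decide)]; decide)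
      (by intro t _ ht; injection ht with h _; exact hd' h)]
    rw [ih [] (cur.reverse :: acc) (by simp [hdom.2.1, hdom.2.2]), List.reverse_nil, pvGlue_nil_pre,
      glue_break cur.reverse (d :: rest') _
        (plines_r (d :: rest') (by intro t ht; injection ht with h _; exact hd' h))]
    simp
  | case6 c rest hn hr hpl ih =>
    have hn' : c ≠ '\n' := by simpa using hn
    have hr' : c ≠ '\r' := by simpa using hr
    intro cur acc hdom
    simp only [List.all_cons, Bool.and_eq_true] at hdom
    rw [go_keep isB c rest cur acc
      (by rw [hB c hdom.1]; simp [hn', hr']) hr', ih (c :: cur) acc hdom.2]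
    unfold pvGlue
    rw [plines_nb c rest hn' hr', hpl]
    simp
  | case7 c rest hn hr l ls hpl ih =>
    have hn' : c ≠ '\n' := by simpa using hn
    have hr' : c ≠ '\r' := by simpa using hr
    intro cur acc hdom
    simp only [List.all_cons, Bool.and_eq_true] at hdom
    rw [go_keep isB c rest cur acc
      (by rw [hB c hdom.1]; simp [hn', hr']) hr', ih (c :: cur) acc hdom.2]
    unfold pvGlue
    rw [plines_nb c rest hn' hr', hpl]
    simp

theorem char_eq_of_toNat (c b : Char) (h : c.toNat = b.toNat) : c = b := by
  apply Char.ext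
  apply UInt32.toNat_inj.mp
  exact h

theorem beq_eq_decide_toNat (c b : Char) : (c == b) = decide (c.toNat = b.toNat) := by
  by_cases h : c = b
  · subst h; simp
  · have : ¬ c.toNat = b.toNat := fun he => h (char_eq_of_toNat c b he)
    simp [h, this]

theorem splitlines_eq_plines (s : List Char) (hs : s.all pvDomChar = true) :
    PySem.Chars.splitlines s = plines s := by
  rw [PySem.Chars.splitlines]
  rw [go_glue _ ?hB s [] [] hs, List.reverse_nil, List.reverse_nil, pvGlue_nil_pre]
  · simp
  case hB =>
    intro c hc
    simp only [pvDomChar, Bool.or_eq_true, Bool.and_eq_true, decide_eq_true_eq,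
      beq_iff_eq] at hc
    rw [beq_eq_decide_toNat c '\n', beq_eq_decide_toNat c '\r']
    show (decide (c.toNat = 10) || decide (c.toNat = 13) || decide (c.toNat = 11) ||
      decide (c.toNat = 12) || decide (c.toNat = 28) || decide (c.toNat = 29) ||
      decide (c.toNat = 30) || decide (c.toNat = 133) || decide (c.toNat = 8232) ||
      decide (c.toNat = 8233)) = _
    have h11 : c.toNat ≠ 11 := by omega
    have h12 : c.toNat ≠ 12 := by omega
    have h28 : c.toNat ≠ 28 := by omega
    have h29 : c.toNat ≠ 29 := by omega
    have h30 : c.toNat ≠ 30 := by omega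
    have h133 : c.toNat ≠ 133 := by omega
    have h8232 : c.toNat ≠ 8232 := by omega
    have h8233 : c.toNat ≠ 8233 := by omega
    simp [h11, h12, h28, h29, h30, h133, h8232, h8233]
    rfl


theorem kwfold_mem (P : String → Bool) (ks : List String) (f : PySem.Set String) (x : String) :
    x ∈ ks.foldl (fun f kw => if P kw then PySem.Set.add f kw else f) f ↔
      x ∈ f ∨ (x ∈ ks ∧ P x = true) := by
  induction ks generalizing f with
  | nil => simp
  | cons a t ih =>
    rw [List.foldl_cons, ih]
    by_cases hP : P a = true
    · rw [if_pos hP]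
      constructor
      · rintro (h | h)
        · rcases (PySem.Set.mem_add f a x).mp h with h | rfl
          · exact Or.inl h
          · exact Or.inr ⟨List.mem_cons_self, hP⟩
        · exact Or.inr ⟨List.mem_cons_of_mem _ h.1, h.2⟩
      · rintro (h | ⟨hm, hx⟩)
        · exact Or.inl ((PySem.Set.mem_add f a x).mpr (Or.inl h))
        · rcases List.mem_cons.mp hm with heq | hm
          · exact Or.inl ((PySem.Set.mem_add f a x).mpr (Or.inr heq))
          · exact Or.inr ⟨hm, hx⟩
    · rw [if_neg hP]
      constructor
      · rintro (h | h)
        · exact Or.inl h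
        · exact Or.inr ⟨List.mem_cons_of_mem _ h.1, h.2⟩
      · rintro (h | ⟨hm, hx⟩)
        · exact Or.inl h
        · rcases List.mem_cons.mp hm with heq | hm
          · rw [heq] at hx; exact absurd hx hP
          · exact Or.inr ⟨hm, hx⟩

theorem kwfold_nodup (P : String → Bool) (ks : List String) (f : PySem.Set String)
    (h : f.Nodup) : (ks.foldl (fun f kw => if P kw then PySem.Set.add f kw else f) f).Nodup := by
  induction ks generalizing f with
  | nil => exact h
  | cons a t ih =>
    rw [List.foldl_cons]
    by_cases hP : P a = true
    · rw [if_pos hP]; exact ih _ (PySem.Set.nodup_add f a h)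
    · rw [if_neg hP]; exact ih _ h

theorem linefold_mem (Q : List Char → String → Bool) (lines : List (List Char))
    (ks : List String) (f : PySem.Set String) (x : String) :
    x ∈ lines.foldl (fun f line => ks.foldl
        (fun f kw => if Q line kw then PySem.Set.add f kw else f) f) f ↔
      x ∈ f ∨ (x ∈ ks ∧ ∃ line ∈ lines, Q line x = true) := by
  induction lines generalizing f with
  | nil => simp
  | cons l t ih =>
    rw [List.foldl_cons, ih, kwfold_mem]
    constructor
    · rintro ((h | ⟨hm, hq⟩) | ⟨hm, line, hline, hq⟩)
      · exact Or.inl h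
      · exact Or.inr ⟨hm, l, List.mem_cons_self, hq⟩
      · exact Or.inr ⟨hm, line, List.mem_cons_of_mem _ hline, hq⟩
    · rintro (h | ⟨hm, line, hline, hq⟩)
      · exact Or.inl (Or.inl h)
      · rcases List.mem_cons.mp hline with heq | hline
        · exact Or.inl (Or.inr ⟨hm, by rw [← heq]; exact hq⟩)
        · exact Or.inr ⟨hm, line, hline, hq⟩

theorem linefold_nodup (Q : List Char → String → Bool) (lines : List (List Char))
    (ks : List String) (f : PySem.Set String) (h : f.Nodup) :
    (lines.foldl (fun f line => ks.foldl
        (fun f kw => if Q line kw then PySem.Set.add f kw else f) f) f).Nodup := by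
  induction lines generalizing f with
  | nil => exact h
  | cons l t ih => exact ih _ (kwfold_nodup _ ks f h)

theorem nodup_len_filter (found : List String) (ks : List String) (Q : String → Bool)
    (hnd : found.Nodup) (hks : ks.Nodup)
    (hmem : ∀ x, x ∈ found ↔ x ∈ ks ∧ Q x = true) :
    found.length = ks.countP Q := by
  have hperm : found.Perm (ks.filter Q) := by
    rw [List.perm_ext_iff_of_nodup hnd (List.Nodup.filter Q hks)]
    intro a
    rw [hmem a, List.mem_filter]
  rw [hperm.length_eq, ← List.countP_eq_length_filter]

theorem loop_split (lines : List (List Char)) (u b : Int) (f : PySem.Set String) :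
    lines.foldl
      (fun (st : Int × Int × PySem.Set String) line =>
        let low := PySem.Chars.lower line
        let url : Int := st.1 + (PySem.Chars.count low pvHttp : Int)
        let found :=
          pvKws.foldl
            (fun f kw => if PySem.Chars.isIn kw.toList low then PySem.Set.add f kw else f)
            st.2.2
        let bl : Int := if pvBullet line then st.2.1 + 1 else st.2.1
        (url, bl, found)) (u, b, f) =
      (u + (lines.map (fun l => (PySem.Chars.count (PySem.Chars.lower l) pvHttp : Int))).sum,
       b + (lines.countP pvBullet : Int),
       lines.foldl
         (fun f line => pvKws.foldl
           (fun f kw =>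
             if PySem.Chars.isIn kw.toList (PySem.Chars.lower line) then PySem.Set.add f kw
             else f) f) f) := by
  induction lines generalizing u b f with
  | nil => simp
  | cons l t ih =>
    rw [List.foldl_cons]
    show (t.foldl _ (u + (PySem.Chars.count (PySem.Chars.lower l) pvHttp : Int),
      (if pvBullet l then b + 1 else b), _)) = _
    rw [ih]
    refine Prod.ext ?_ (Prod.ext ?_ ?_)
    · show u + _ + _ = u + _
      simp
      omega
    · show (if pvBullet l then b + 1 else b) + _ = b + _
      rw [List.countP_cons]
      by_cases hb : pvBullet l = true <;> (simp [hb]; try omega)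
    · rfl

theorem sum_cast_int (g : List Char → Nat) (ls : List (List Char)) :
    (ls.map (fun l => (g l : Int))).sum = ((ls.map g).sum : Int) := by
  rw [Nat.cast_list_sum, List.map_map]
  rfl

-- side facts about the literal patterns, by computation
theorem http_ne_nil : pvHttp ≠ [] := by decide
theorem http_nb : ∀ c ∈ pvHttp, pvNB c = true := by
  intro c hc
  simp [pvHttp] at hc
  rcases hc with rfl | rfl | rfl | rfl <;> rfl
theorem kws_nodup : pvKws.Nodup := by
  simp [pvKws]
theorem kws_ok : ∀ kw ∈ pvKws, kw.toList ≠ [] ∧ ∀ c ∈ kw.toList, pvNB c = true := by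
  have h : (pvKws.all (fun kw => (!kw.toList.isEmpty) && kw.toList.all pvNB)) = true := by decide
  intro kw hkw
  have h2 := List.all_eq_true.mp h kw hkw
  rw [Bool.and_eq_true] at h2
  refine ⟨?_, List.all_eq_true.mp h2.2⟩
  intro he
  rw [he] at h2
  simp at h2

-- the three scans of A, expressed over the lines of body (the shape B computes)
theorem url_decomp (s : List Char) (hs : s.all pvDomChar = true) :
    (PySem.Chars.count (PySem.Chars.lower s) pvHttp : Int) =
      ((PySem.Chars.splitlines s).map
        (fun l => (PySem.Chars.count (PySem.Chars.lower l) pvHttp : Int))).sum := by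
  rw [count_eq_gcount _ _ http_ne_nil,
    gcount_plines pvHttp http_ne_nil http_nb (PySem.Chars.lower s).length _ le_rfl,
    plines_lower, splitlines_eq_plines s hs, sum_cast_int, List.map_map]
  refine congrArg Int.ofNat (congrArg List.sum (List.map_congr_left ?_))
  intro l _
  exact (count_eq_gcount _ _ http_ne_nil).symm

theorem kw_decomp (kw : String) (hkw : kw ∈ pvKws) (s : List Char)
    (hs : s.all pvDomChar = true) :
    (PySem.Chars.isIn kw.toList (PySem.Chars.lower s) = true) ↔
      ∃ l ∈ PySem.Chars.splitlines s, PySem.Chars.isIn kw.toList (PySem.Chars.lower l) = true := by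
  obtain ⟨hne, hnb⟩ := kws_ok kw hkw
  rw [PySem.Chars.isIn_iff_infix,
    infix_plines kw.toList hne hnb (PySem.Chars.lower s).length _ le_rfl,
    plines_lower, splitlines_eq_plines s hs]
  constructor
  · rintro ⟨l, hl, hin⟩
    rcases List.mem_map.mp hl with ⟨l0, hl0, rfl⟩
    exact ⟨l0, hl0, (PySem.Chars.isIn_iff_infix _ _).mpr hin⟩
  · rintro ⟨l0, hl0, hin⟩
    exact ⟨PySem.Chars.lower l0, List.mem_map_of_mem hl0,
      (PySem.Chars.isIn_iff_infix _ _).mp hin⟩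

-- ===== VERDICT (by name: the statement is the Claim_ definition above) =====
theorem is_job_message_py_spec : Claim_equal_is_job_message_py := by
  unfold Claim_equal_is_job_message_py
  intro body hdom
  have hs : body.toList.all pvDomChar = true := by
    simpa [Dom_is_job_message_py, pvDomStr] using hdom
  unfold Spec_is_job_message_py is_job_message_py is_job_message_py_alt
  by_cases hg : (PySem.Chars.strip (PySem.Chars.lower body.toList)).isEmpty = true
  · rw [if_pos hg, if_pos hg]
  · rw [if_neg hg, if_neg hg]
    rw [loop_split]
    -- url counts agree
    have hurl : (PySem.Chars.count (PySem.Chars.lower body.toList) pvHttp : Int) =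
        0 + ((PySem.Chars.splitlines body.toList).map
          (fun l => (PySem.Chars.count (PySem.Chars.lower l) pvHttp : Int))).sum := by
      rw [url_decomp body.toList hs]
      omega
    -- bullet counts agree
    have hbul : ((PySem.Chars.splitlines body.toList).map
        (fun line => if pvBullet line then (1 : Int) else 0)).sum =
        0 + ((PySem.Chars.splitlines body.toList).countP pvBullet : Int) := by
      rw [PySem.List.sum_map_ite_one_zero]
      omega
    -- keyword hits agree with the size of the found set
    have hkwset : (((PySem.Chars.splitlines body.toList).foldl
        (fun f line => pvKws.foldl
          (fun f kw =>
            if PySem.Chars.isIn kw.toList (PySem.Chars.lower line) then PySem.Set.add f kw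
            else f) f) PySem.Set.empty).length : Int) =
        (pvKws.map
          (fun kw => if PySem.Chars.isIn kw.toList (PySem.Chars.lower body.toList) then (1 : Int)
            else 0)).sum := by
      rw [PySem.List.sum_map_ite_one_zero]
      congr 1
      have hmem : ∀ x, x ∈ ((PySem.Chars.splitlines body.toList).foldl
          (fun f line => pvKws.foldl
            (fun f kw =>
              if PySem.Chars.isIn kw.toList (PySem.Chars.lower line) then PySem.Set.add f kw
              else f) f) PySem.Set.empty) ↔
          x ∈ pvKws ∧ (decide (∃ l ∈ PySem.Chars.splitlines body.toList,
            PySem.Chars.isIn x.toList (PySem.Chars.lower l) = true) = true) := by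
        intro x
        rw [linefold_mem (fun line kw => PySem.Chars.isIn kw.toList (PySem.Chars.lower line))]
        simp [PySem.Set.empty]
      rw [nodup_len_filter _ pvKws _
        (linefold_nodup _ _ _ PySem.Set.empty (by simp [PySem.Set.empty])) kws_nodup hmem]
      apply List.countP_congr
      intro kw hkw
      rw [decide_eq_true_iff, kw_decomp kw hkw body.toList hs]
    rw [hurl, hbul, ← hkwset]
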